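-- pv_equiv track=rewrite | github.com/munnasuprathik/Tend | backend/utils/email_templates.py | cleanup_message_text
-- ===== SOURCE A (Python) =====
-- def cleanup_message_text(message: str) -> str:
--     """Remove boilerplate lines and keep the message concise."""
--     if not message:
--         return ""
--
--     filtered_lines = []
--     for raw_line in message.splitlines():
--         line = raw_line.strip()
--         if not line:
--             filtered_lines.append("")
--             continue
--         if "this line was generated by ai" in line.lower():
--             continue
--         filtered_lines.append(line)
--
--     collapsed = []
--     previous_blank = False
--     for line in filtered_lines:
--         if line == "":
--             if not previous_blank:
--                 collapsed.append("")
--             previous_blank = True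
--         else:
--             collapsed.append(line)
--             previous_blank = False
--
--     text = "\n".join(collapsed).strip()
--     if not text:
--         return ""
--
--     paragraphs = [p.strip() for p in text.split("\n\n") if p.strip()]
--     if len(paragraphs) > 3:
--         paragraphs = paragraphs[:3]
--     return "\n\n".join(paragraphs)
-- ===== SOURCE B (Python) =====
-- def cleanup_message_text(message: str) -> str:
--     """Remove boilerplate lines and keep the message concise."""
--     paragraphs = []
--     current = []
--     for raw_line in message.splitlines():
--         line = raw_line.strip()
--         if not line:
--             if current:
--                 paragraphs.append("\n".join(current))
--                 current = []
--         elif "this line was generated by ai" not in line.lower():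
--             current.append(line)
--     if current:
--         paragraphs.append("\n".join(current))
--     return "\n\n".join(paragraphs[:3])
-- ===== Notes on version B (the rewrite author's own statement) =====
-- stated objective: faster
-- what changed: Replaces A's five-stage pipeline (filter to a line list, collapse blank runs in a second pass, join everything into one big string, re-split it on blank separators, re-strip and re-filter the pieces) with a single pass over the lines that builds the paragraph list directly with a current-paragraph accumulator flushed at blank lines.
import Mathlib
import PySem

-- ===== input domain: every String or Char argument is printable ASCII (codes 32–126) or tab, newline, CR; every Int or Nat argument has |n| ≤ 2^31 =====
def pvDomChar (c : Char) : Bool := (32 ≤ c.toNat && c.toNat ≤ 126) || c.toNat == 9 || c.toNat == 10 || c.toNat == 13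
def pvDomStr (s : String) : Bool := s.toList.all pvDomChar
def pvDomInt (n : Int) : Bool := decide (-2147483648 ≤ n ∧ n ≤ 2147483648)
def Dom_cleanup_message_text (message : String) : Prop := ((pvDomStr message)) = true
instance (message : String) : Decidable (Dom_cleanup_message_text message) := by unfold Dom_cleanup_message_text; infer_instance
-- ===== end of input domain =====

-- B replaces A's five-stage pipeline (filter, collapse blanks, join, re-split, re-strip) with a
-- single pass that builds the paragraph list directly with a current-paragraph accumulator.

-- the boilerplate phrase (a string literal in both Pythons)
def pvPhrase : List Char := "this line was generated by ai".toList

-- ===== PORT A =====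
def cleanup_message_text (message : String) : String :=
  if message.toList = [] then "" else
  let filtered : List (List Char) :=
    (PySem.Chars.splitlines message.toList).foldl (fun acc raw =>
      let line := PySem.Chars.strip raw
      if line = [] then acc ++ [line]
      else if PySem.Chars.isIn pvPhrase (PySem.Chars.lower line) then acc
      else acc ++ [line]) []
  let collapsed : List (List Char) :=
    (filtered.foldl (fun (st : List (List Char) × Bool) line =>
      if line = [] then (if st.2 then st.1 else st.1 ++ [[]], true)
      else (st.1 ++ [line], false)) ([], false)).1
  let text := PySem.Chars.strip (PySem.Chars.join ['\n'] collapsed)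
  if text = [] then "" else
  let paragraphs : List (List Char) :=
    ((PySem.Chars.splitOn text ['\n', '\n']).map PySem.Chars.strip).filter (fun p => !p.isEmpty)
  let paragraphs := if paragraphs.length > 3 then paragraphs.take 3 else paragraphs
  String.ofList (PySem.Chars.join ['\n', '\n'] paragraphs)

-- ===== PORT B =====
def cleanup_message_text_alt (message : String) : String :=
  let st : List (List Char) × List (List Char) :=
    (PySem.Chars.splitlines message.toList).foldl (fun st raw =>
      let line := PySem.Chars.strip raw
      if line = [] then
        (if st.2 = [] then st.1 else st.1 ++ [PySem.Chars.join ['\n'] st.2], [])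
      else if PySem.Chars.isIn pvPhrase (PySem.Chars.lower line) then st
      else (st.1, st.2 ++ [line])) ([], [])
  let paragraphs := if st.2 = [] then st.1 else st.1 ++ [PySem.Chars.join ['\n'] st.2]
  String.ofList (PySem.Chars.join ['\n', '\n'] (paragraphs.take 3))

-- ===== PRECONDITION & SPEC =====
def Spec_cleanup_message_text (message : String) (out : String) : Prop := out = cleanup_message_text_alt message
instance (message : String) (out : String) : Decidable (Spec_cleanup_message_text message out) := by unfold Spec_cleanup_message_text; infer_instance

-- ===== CLAIM (what is proved, stated in full; the proofs are below) =====
def Claim_equal_cleanup_message_text : Prop := ∀ (message : String), Dom_cleanup_message_text message → Spec_cleanup_message_text message (cleanup_message_text message)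

-- ===== LEMMAS AND PROOFS =====

-- a good line: already stripped and free of newlines (what `strip` of a splitlines piece satisfies)
def GLn (l : List Char) : Prop := PySem.Chars.strip l = l ∧ '\n' ∉ l

-- which (stripped) lines both programs keep
def keepL (l : List Char) : Bool := l.isEmpty || !(PySem.Chars.isIn pvPhrase (PySem.Chars.lower l))

-- recursive form of A's blank-collapsing fold (b = "previous line was blank")
def colR : Bool → List (List Char) → List (List Char)
  | _, [] => []
  | b, l :: xs => if l = [] then (if b then colR true xs else [] :: colR true xs) else l :: colR false xs

-- recursive form of B's paragraph grouping: blocks of nonblank lines, cur = current open block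
def grpL : List (List Char) → List (List Char) → List (List (List Char))
  | cur, [] => if cur = [] then [] else [cur]
  | cur, l :: xs =>
      if l = [] then (if cur = [] then grpL [] xs else cur :: grpL [] xs)
      else grpL (cur ++ [l]) xs

-- "no two consecutive newlines"
def noNN : List Char → Bool
  | [] => true
  | [_] => true
  | a :: b :: t => !(a = '\n' && b = '\n') && noNN (b :: t)

-- ---------- generic dropWhile / strip facts ----------

theorem pv_dropWhile_head_false {p : Char → Bool} :
    ∀ (x t : List Char) (c : Char), List.dropWhile p x = c :: t → p c = false := by
  intro x
  induction x with
  | nil => intro t c h; simp at h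
  | cons a x ih =>
    intro t c h
    by_cases hp : p a
    · rw [List.dropWhile_cons, if_pos hp] at h; exact ih _ _ h
    · rw [List.dropWhile_cons, if_neg hp] at h
      cases h; simpa using hp

theorem pv_dw_idem {p : Char → Bool} (x : List Char) :
    List.dropWhile p (List.dropWhile p x) = List.dropWhile p x := by
  cases h : List.dropWhile p x with
  | nil => simp
  | cons c t =>
    have hc := pv_dropWhile_head_false x t c h
    rw [List.dropWhile_cons, if_neg (by simp [hc])]

theorem pv_rstrip_append (a b : List Char) :
    PySem.Chars.rstrip (a ++ b) =
      if PySem.Chars.rstrip b = [] then PySem.Chars.rstrip a else a ++ PySem.Chars.rstrip b := by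
  show (List.dropWhile PySem.Chars.isspace (a ++ b).reverse).reverse = _
  rw [List.reverse_append, List.dropWhile_append]
  by_cases h : List.dropWhile PySem.Chars.isspace b.reverse = []
  · simp [h, PySem.Chars.rstrip]
  · simp only [List.isEmpty_iff, h, if_false]
    rw [List.reverse_append]
    simp [PySem.Chars.rstrip, h, List.reverse_eq_nil_iff]

theorem pv_rstrip_nil_iff (x : List Char) :
    PySem.Chars.rstrip x = [] ↔ ∀ c ∈ x, PySem.Chars.isspace c = true := by
  show (List.dropWhile PySem.Chars.isspace x.reverse).reverse = [] ↔ _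
  rw [List.reverse_eq_nil_iff, List.dropWhile_eq_nil_iff]
  constructor
  · intro h c hc; exact h c (by simpa using hc)
  · intro h c hc; exact h c (by simpa using hc)

theorem pv_lstrip_cons_false {c : Char} (t : List Char) (h : PySem.Chars.isspace c = false) :
    PySem.Chars.lstrip (c :: t) = c :: t := by
  show List.dropWhile _ _ = _
  rw [List.dropWhile_cons, if_neg (by simp [h])]

theorem pv_lstrip_cons_true {c : Char} (t : List Char) (h : PySem.Chars.isspace c = true) :
    PySem.Chars.lstrip (c :: t) = PySem.Chars.lstrip t := by
  show List.dropWhile _ _ = _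
  rw [List.dropWhile_cons, if_pos (by simp [h])]
  rfl

theorem pv_rstrip_length (x : List Char) :
    (PySem.Chars.rstrip x).length ≤ x.length := by
  show (List.dropWhile PySem.Chars.isspace x.reverse).reverse.length ≤ _
  rw [List.length_reverse]
  calc (List.dropWhile PySem.Chars.isspace x.reverse).length
      ≤ x.reverse.length := List.length_dropWhile_le _ _
    _ = x.length := List.length_reverse

theorem pv_strip_parts (l : List Char) (h : PySem.Chars.strip l = l) :
    PySem.Chars.lstrip l = l ∧ PySem.Chars.rstrip l = l := by
  have hdef : PySem.Chars.strip l = PySem.Chars.rstrip (PySem.Chars.lstrip l) := rfl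
  have h1 : (PySem.Chars.lstrip l).length ≤ l.length := List.length_dropWhile_le _ _
  have h2 : (PySem.Chars.rstrip (PySem.Chars.lstrip l)).length ≤ (PySem.Chars.lstrip l).length :=
    pv_rstrip_length _
  have h3 : (PySem.Chars.rstrip (PySem.Chars.lstrip l)).length = l.length := by
    rw [← hdef, h]
  have hlen : (PySem.Chars.lstrip l).length = l.length := by omega
  have h4 : PySem.Chars.lstrip l = l := (List.dropWhile_suffix _).eq_of_length hlen
  have h5 : PySem.Chars.rstrip (PySem.Chars.lstrip l) = l := by rw [← hdef]; exact h
  rw [h4] at h5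
  exact ⟨h4, h5⟩

theorem pv_stripped_head (l : List Char) (h : PySem.Chars.lstrip l = l) :
    ∀ c t, l = c :: t → PySem.Chars.isspace c = false := by
  intro c t hl
  subst hl
  by_cases hc : PySem.Chars.isspace c = true
  · exfalso
    have h5 : List.dropWhile PySem.Chars.isspace t = c :: t := by
      have h6 := h
      rwa [pv_lstrip_cons_true t hc] at h6
    have h6 := congrArg List.length h5
    have hle := List.length_dropWhile_le PySem.Chars.isspace t
    simp at h6; omega
  · simpa using hc

theorem pv_stripped_last (l : List Char) (h : PySem.Chars.rstrip l = l) :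
    ∀ c t, l.reverse = c :: t → PySem.Chars.isspace c = false := by
  intro c t hl
  by_cases hc : PySem.Chars.isspace c = true
  · exfalso
    have h1 : (List.dropWhile PySem.Chars.isspace l.reverse).reverse = l := h
    rw [hl, List.dropWhile_cons, if_pos (by simp [hc])] at h1
    have h2 := congrArg List.length h1
    have hle := List.length_dropWhile_le PySem.Chars.isspace t
    have hlen : l.length = t.length + 1 := by
      have := congrArg List.length hl; simp at this; omega
    simp at h2; omega
  · simpa using hc

theorem pv_rstrip_prefix (x : List Char) : PySem.Chars.rstrip x <+: x := by
  have h1 : List.dropWhile PySem.Chars.isspace x.reverse <:+ x.reverse := List.dropWhile_suffix _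
  have h2 := h1.reverse
  simpa [PySem.Chars.rstrip] using h2

theorem pv_strip_subset (x : List Char) : ∀ c ∈ PySem.Chars.strip x, c ∈ x := by
  intro c hc
  have h1 : PySem.Chars.rstrip (PySem.Chars.lstrip x) <+: PySem.Chars.lstrip x := pv_rstrip_prefix _
  have h2 : PySem.Chars.lstrip x <:+ x := List.dropWhile_suffix _
  exact h2.subset (h1.subset hc)

theorem pv_strip_strip (x : List Char) :
    PySem.Chars.strip (PySem.Chars.strip x) = PySem.Chars.strip x := by
  have hdef : ∀ y, PySem.Chars.strip y = PySem.Chars.rstrip (PySem.Chars.lstrip y) := fun _ => rfl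
  have hri : ∀ y, PySem.Chars.rstrip (PySem.Chars.rstrip y) = PySem.Chars.rstrip y := by
    intro y
    show (List.dropWhile _ (List.dropWhile _ y.reverse).reverse.reverse).reverse = _
    rw [List.reverse_reverse, pv_dw_idem]
    rfl
  have hr : PySem.Chars.rstrip (PySem.Chars.strip x) = PySem.Chars.strip x := hri _
  have hl : PySem.Chars.lstrip (PySem.Chars.strip x) = PySem.Chars.strip x := by
    cases hsx : PySem.Chars.strip x with
    | nil => rfl
    | cons c t =>
      have hpre : PySem.Chars.strip x <+: PySem.Chars.lstrip x := hdef x ▸ pv_rstrip_prefix _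
      rw [hsx] at hpre
      obtain ⟨r, hr2⟩ := hpre
      have hc : PySem.Chars.isspace c = false := by
        apply pv_dropWhile_head_false (p := PySem.Chars.isspace) x (t ++ r) c
        show List.dropWhile _ x = _
        have h7 : PySem.Chars.lstrip x = List.dropWhile PySem.Chars.isspace x := rfl
        rw [← h7, ← hr2]; simp
      exact pv_lstrip_cons_false _ hc
  rw [hdef (PySem.Chars.strip x), hl, hr]

theorem pv_rstrip_ne_nil_of_head (c : Char) (t : List Char) (h : PySem.Chars.isspace c = false) :
    PySem.Chars.rstrip (c :: t) ≠ [] := by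
  rw [Ne, pv_rstrip_nil_iff]
  intro hall
  have := hall c (by simp)
  rw [this] at h; cases h

theorem pv_getLast?_mem (l : List Char) (c : Char) (h : l.getLast? = some c) : c ∈ l := by
  have h2 : c ∈ l.reverse := by
    rw [← List.head?_reverse] at h
    cases hr : l.reverse with
    | nil => rw [hr] at h; cases h
    | cons a t =>
      rw [hr] at h
      have ha : a = c := by simpa using h
      simp [ha]
  simpa using h2

theorem pv_rstrip_getLast (l : List Char) (h : PySem.Chars.rstrip l = l) :
    l.getLast? ≠ some '\n' := by
  intro hl
  have h1 : l.reverse.head? = some '\n' := by rw [List.head?_reverse]; exact hl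
  obtain ⟨t, ht⟩ : ∃ t, l.reverse = '\n' :: t := by
    cases hrev : l.reverse with
    | nil => rw [hrev] at h1; cases h1
    | cons a t =>
      rw [hrev] at h1
      have ha : a = '\n' := by simpa using h1
      exact ⟨t, by rw [ha]⟩
  have := pv_stripped_last l h '\n' t ht
  simp [PySem.Chars.isspace] at this

-- ---------- splitlines pieces contain no break characters ----------

theorem pv_splitlines_go_chars (isB : Char → Bool) :
    ∀ (s cur : List Char) (acc : List (List Char)),
      (∀ c ∈ cur, isB c = false) → (∀ p ∈ acc, ∀ c ∈ p, isB c = false) →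
      ∀ p ∈ PySem.Chars.splitlines.go isB s cur acc, ∀ c ∈ p, isB c = false := by
  intro s cur acc
  induction s, cur, acc using PySem.Chars.splitlines.go.induct (isB := isB) with
  | case1 cur acc hemp =>
    intro h1 h2 p hp
    rw [PySem.Chars.splitlines.go, if_pos hemp] at hp
    exact h2 p (by simpa using hp)
  | case2 cur acc hemp =>
    intro h1 h2 p hp
    rw [PySem.Chars.splitlines.go, if_neg hemp] at hp
    rw [List.mem_reverse] at hp
    rcases List.mem_cons.mp hp with h | h
    · subst h; intro c hc; exact h1 c (by simpa using hc)
    · exact h2 p h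
  | case3 rest cur acc ih =>
    intro h1 h2
    rw [PySem.Chars.splitlines.go]
    apply ih (by simp)
    intro p hp
    rcases List.mem_cons.mp hp with h | h
    · subst h; intro c hc; exact h1 c (by simpa using hc)
    · exact h2 p h
  | case4 c rest cur acc hne hB ih =>
    intro h1 h2
    have hunf : PySem.Chars.splitlines.go isB (c :: rest) cur acc
        = PySem.Chars.splitlines.go isB rest [] (cur.reverse :: acc) := by
      rw [PySem.Chars.splitlines.go.eq_def]
      split
      · rename_i heq; exact absurd heq (by simp)
      · rename_i rest1 heq
        exfalso
        injection heq with hc htl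
        exact hne rest1 hc htl
      · rename_i c1 rest1 heq
        injection heq with hc htl
        subst hc; subst htl
        simp [hB]
    rw [hunf]
    apply ih (by simp)
    intro p hp
    rcases List.mem_cons.mp hp with h | h
    · subst h; intro c' hc'; exact h1 c' (by simpa using hc')
    · exact h2 p h
  | case5 c rest cur acc hne hB ih =>
    intro h1 h2
    have hunf : PySem.Chars.splitlines.go isB (c :: rest) cur acc
        = PySem.Chars.splitlines.go isB rest (c :: cur) acc := by
      rw [PySem.Chars.splitlines.go.eq_def]
      split
      · rename_i heq; exact absurd heq (by simp)
      · rename_i rest1 heq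
        exfalso
        injection heq with hc htl
        exact hne rest1 hc htl
      · rename_i c1 rest1 heq
        injection heq with hc htl
        subst hc; subst htl
        simp [hB]
    rw [hunf]
    apply ih ?_ h2
    intro c' hc'
    rcases List.mem_cons.mp hc' with h | h
    · subst h; simpa using hB
    · exact h1 c' h

theorem pv_splitlines_no_nl (s : List Char) : ∀ p ∈ PySem.Chars.splitlines s, '\n' ∉ p := by
  intro p hp hnl
  have hp' : p ∈ PySem.Chars.splitlines.go
      (fun c =>
        have n := c.toNat
        decide (n = 10) || decide (n = 13) || decide (n = 11) || decide (n = 12) || decide (n = 28) ||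
          decide (n = 29) || decide (n = 30) || decide (n = 133) || decide (n = 8232) || decide (n = 8233))
      s [] [] := hp
  have h := pv_splitlines_go_chars _ s [] [] (by simp) (by simp) p hp' '\n' hnl
  exact absurd h (by decide)

-- ---------- fold characterisations ----------

theorem pv_filteredA_eq (rs : List (List Char)) :
    ∀ acc, rs.foldl (fun acc raw =>
      if PySem.Chars.strip raw = [] then acc ++ [PySem.Chars.strip raw]
      else if PySem.Chars.isIn pvPhrase (PySem.Chars.lower (PySem.Chars.strip raw)) then acc
      else acc ++ [PySem.Chars.strip raw]) acc
    = acc ++ ((rs.map PySem.Chars.strip).filter keepL) := by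
  induction rs with
  | nil => intro acc; simp
  | cons r rs ih =>
    intro acc
    simp only [List.foldl_cons, List.map_cons, List.filter_cons]
    by_cases h1 : PySem.Chars.strip r = []
    · rw [if_pos h1, ih, if_pos (show keepL (PySem.Chars.strip r) = true by simp [keepL, h1])]
      simp
    · by_cases h2 : PySem.Chars.isIn pvPhrase (PySem.Chars.lower (PySem.Chars.strip r)) = true
      · rw [if_neg h1, if_pos h2, ih,
          if_neg (show ¬ keepL (PySem.Chars.strip r) = true by
            simp [keepL, List.isEmpty_iff, h1, h2])]
      · rw [if_neg h1, if_neg h2, ih,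
          if_pos (show keepL (PySem.Chars.strip r) = true by
            simp [keepL, List.isEmpty_iff]
            exact Or.inr (by simpa using h2))]
        simp

theorem pv_colA_eq (xs : List (List Char)) :
    ∀ (acc : List (List Char)) (b : Bool),
      (xs.foldl (fun (st : List (List Char) × Bool) line =>
        if line = [] then (if st.2 then st.1 else st.1 ++ [[]], true)
        else (st.1 ++ [line], false)) (acc, b)).1 = acc ++ colR b xs := by
  induction xs with
  | nil => intro acc b; simp [colR]
  | cons l xs ih =>
    intro acc b
    simp only [List.foldl_cons]
    by_cases hl : l = []
    · rw [if_pos hl]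
      cases b with
      | true => rw [if_pos rfl, ih]; simp [colR, hl]
      | false =>
        rw [show (if (false = true) then acc else acc ++ [([] : List Char)]) = acc ++ [[]] from by simp]
        rw [ih]; simp [colR, hl]
    · rw [if_neg hl, ih]; simp [colR, hl]

def finB (st : List (List Char) × List (List Char)) : List (List Char) :=
  if st.2 = [] then st.1 else st.1 ++ [PySem.Chars.join ['\n'] st.2]

theorem pv_foldB_eq (rs : List (List Char)) :
    ∀ (P C : List (List Char)),
      finB (rs.foldl (fun st raw =>
        if PySem.Chars.strip raw = [] then
          (if st.2 = [] then st.1 else st.1 ++ [PySem.Chars.join ['\n'] st.2], [])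
        else if PySem.Chars.isIn pvPhrase (PySem.Chars.lower (PySem.Chars.strip raw)) then st
        else (st.1, st.2 ++ [PySem.Chars.strip raw])) (P, C))
      = P ++ (grpL C ((rs.map PySem.Chars.strip).filter keepL)).map (PySem.Chars.join ['\n']) := by
  induction rs with
  | nil =>
    intro P C
    by_cases hc : C = [] <;> simp [finB, grpL, hc]
  | cons r rs ih =>
    intro P C
    simp only [List.foldl_cons, List.map_cons, List.filter_cons]
    by_cases h1 : PySem.Chars.strip r = []
    · rw [if_pos h1, ih, if_pos (show keepL (PySem.Chars.strip r) = true by simp [keepL, h1])]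
      rw [h1]
      rw [show grpL C ([] :: (rs.map PySem.Chars.strip).filter keepL)
            = if C = [] then grpL [] ((rs.map PySem.Chars.strip).filter keepL)
              else C :: grpL [] ((rs.map PySem.Chars.strip).filter keepL) from by simp [grpL]]
      by_cases hc : C = [] <;> simp [hc, List.append_assoc]
    · by_cases h2 : PySem.Chars.isIn pvPhrase (PySem.Chars.lower (PySem.Chars.strip r)) = true
      · rw [if_neg h1, if_pos h2, ih,
          if_neg (show ¬ keepL (PySem.Chars.strip r) = true by
            simp [keepL, List.isEmpty_iff, h1, h2])]
      · rw [if_neg h1, if_neg h2, ih,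
          if_pos (show keepL (PySem.Chars.strip r) = true by
            simp [keepL, List.isEmpty_iff]
            exact Or.inr (by simpa using h2))]
        rw [show grpL C (PySem.Chars.strip r :: (rs.map PySem.Chars.strip).filter keepL)
              = grpL (C ++ [PySem.Chars.strip r]) ((rs.map PySem.Chars.strip).filter keepL) from by
            simp [grpL, h1]]

-- ---------- join ("\n".join / "\n\n".join) facts ----------

theorem pv_j_nil (s : List Char) : PySem.Chars.join s [] = [] := by
  simp [PySem.Chars.join, List.intercalate]

theorem pv_j_single (s a : List Char) : PySem.Chars.join s [a] = a := by
  simp [PySem.Chars.join, List.intercalate]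

theorem pv_j_cons (s a : List Char) (R : List (List Char)) (h : R ≠ []) :
    PySem.Chars.join s (a :: R) = a ++ s ++ PySem.Chars.join s R := by
  cases R with
  | nil => cases h rfl
  | cons r rs => simp [PySem.Chars.join, List.intercalate, List.intersperse]

theorem pv_j_append (s : List Char) (u v : List (List Char)) (hu : u ≠ []) (hv : v ≠ []) :
    PySem.Chars.join s (u ++ v) = PySem.Chars.join s u ++ s ++ PySem.Chars.join s v := by
  induction u with
  | nil => cases hu rfl
  | cons a u ih =>
    cases u with
    | nil => simp [pv_j_cons s a v hv]
    | cons b u' =>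
      rw [List.cons_append, pv_j_cons s a _ (by simp), pv_j_cons s a _ (by simp), ih (by simp)]
      simp [List.append_assoc]

theorem pv_j1_head (a : List Char) (rest : List (List Char)) (c : Char) (t : List Char)
    (ha : a = c :: t) :
    ∃ w, PySem.Chars.join ['\n'] (a :: rest) = c :: w := by
  cases rest with
  | nil => exact ⟨t, by rw [pv_j_single, ha]⟩
  | cons b rs =>
    refine ⟨t ++ '\n' :: PySem.Chars.join ['\n'] (b :: rs), ?_⟩
    rw [pv_j_cons _ _ _ (by simp), ha]
    simp

theorem pv_j1_ne_nil (blk : List (List Char)) (hne : blk ≠ []) (hl : ∀ l ∈ blk, l ≠ []) :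
    PySem.Chars.join ['\n'] blk ≠ [] := by
  cases blk with
  | nil => cases hne rfl
  | cons a rest =>
    have ha : a ≠ [] := hl a (by simp)
    obtain ⟨c, t, hct⟩ : ∃ c t, a = c :: t := by
      cases a with | nil => cases ha rfl | cons c t => exact ⟨c, t, rfl⟩
    obtain ⟨w, hw⟩ := pv_j1_head a rest c t hct
    rw [hw]; simp

-- j1 of a block of stripped nonblank lines is untouched by strip
theorem pv_j1_ends (blk : List (List Char)) :
    blk ≠ [] → (∀ l ∈ blk, PySem.Chars.strip l = l ∧ l ≠ []) →
    PySem.Chars.lstrip (PySem.Chars.join ['\n'] blk) = PySem.Chars.join ['\n'] blk ∧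
    PySem.Chars.rstrip (PySem.Chars.join ['\n'] blk) = PySem.Chars.join ['\n'] blk := by
  induction blk with
  | nil => intro h; cases h rfl
  | cons a rest ih =>
    intro _ hl
    obtain ⟨hsa, hna⟩ := hl a (by simp)
    obtain ⟨c, t, hct⟩ : ∃ c t, a = c :: t := by
      cases a with | nil => cases hna rfl | cons c t => exact ⟨c, t, rfl⟩
    have hc : PySem.Chars.isspace c = false :=
      pv_stripped_head a (pv_strip_parts a hsa).1 c t hct
    obtain ⟨w, hw⟩ := pv_j1_head a rest c t hct
    constructor
    · rw [hw]; exact pv_lstrip_cons_false _ hc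
    · cases rest with
      | nil => rw [pv_j_single]; exact (pv_strip_parts a hsa).2
      | cons b rs =>
        obtain ⟨_, ihr⟩ := ih (by simp) (fun l h => hl l (by simp [h]))
        have hjne : PySem.Chars.join ['\n'] (b :: rs) ≠ [] :=
          pv_j1_ne_nil _ (by simp) (fun l h => (hl l (by simp [h])).2)
        have e1 : PySem.Chars.join ['\n'] (a :: b :: rs)
            = a ++ ('\n' :: PySem.Chars.join ['\n'] (b :: rs)) := by
          rw [pv_j_cons ['\n'] a (b :: rs) (by simp)]; simp
        have e2 : PySem.Chars.rstrip ('\n' :: PySem.Chars.join ['\n'] (b :: rs))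
            = '\n' :: PySem.Chars.join ['\n'] (b :: rs) := by
          have h3 := pv_rstrip_append ['\n'] (PySem.Chars.join ['\n'] (b :: rs))
          rw [ihr, if_neg hjne] at h3
          simpa using h3
        rw [e1, pv_rstrip_append, e2, if_neg (by simp), ← e1]

-- ---------- noNN lemmas ----------

theorem pv_noNN_tail (c : Char) (t : List Char) (h : noNN (c :: t) = true) : noNN t = true := by
  cases t with
  | nil => rfl
  | cons b t' =>
    rw [show noNN (c :: b :: t') = (!(c = '\n' && b = '\n') && noNN (b :: t')) from rfl] at h
    exact (Bool.and_eq_true_iff.mp h).2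

theorem pv_noNN_of_no_nl : ∀ (x : List Char), '\n' ∉ x → noNN x = true := by
  intro x
  induction x with
  | nil => intro _; rfl
  | cons a t ih =>
    intro h
    cases t with
    | nil => rfl
    | cons b t' =>
      rw [show noNN (a :: b :: t') = (!(a = '\n' && b = '\n') && noNN (b :: t')) from rfl]
      rw [Bool.and_eq_true_iff]
      constructor
      · have ha : a ≠ '\n' := by intro he; exact h (by simp [he])
        simp [ha]
      · exact ih (fun hb => h (by simp [hb]))

theorem pv_noNN_append : ∀ (a b : List Char), noNN a = true → noNN b = true →
    (a.getLast? = some '\n' → b.head? ≠ some '\n') → noNN (a ++ b) = true := by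
  intro a
  induction a with
  | nil => intro b _ hb _; simpa using hb
  | cons c a' ih =>
    intro b hca hb hbd
    cases a' with
    | nil =>
      cases b with
      | nil => rfl
      | cons d b' =>
        rw [show ([c] ++ d :: b' : List Char) = c :: d :: b' from rfl]
        rw [show noNN (c :: d :: b') = (!(c = '\n' && d = '\n') && noNN (d :: b')) from rfl]
        rw [Bool.and_eq_true_iff]
        refine ⟨?_, hb⟩
        by_cases hc : c = '\n'
        · have hd' := hbd (by simp [hc])
          have hd : d ≠ '\n' := by intro he; exact hd' (by simp [he])
          simp [hd]
        · simp [hc]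
    | cons e a'' =>
      rw [show ((c :: e :: a'') ++ b : List Char) = c :: ((e :: a'') ++ b) from rfl]
      rw [show ((e :: a'') ++ b : List Char) = e :: (a'' ++ b) from rfl]
      rw [show noNN (c :: e :: (a'' ++ b)) = (!(c = '\n' && e = '\n') && noNN (e :: (a'' ++ b))) from rfl]
      rw [Bool.and_eq_true_iff]
      constructor
      · rw [show noNN (c :: e :: a'') = (!(c = '\n' && e = '\n') && noNN (e :: a'')) from rfl] at hca
        exact (Bool.and_eq_true_iff.mp hca).1
      · rw [show (e :: (a'' ++ b) : List Char) = (e :: a'') ++ b from rfl]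
        apply ih b ?_ hb ?_
        · rw [show noNN (c :: e :: a'') = (!(c = '\n' && e = '\n') && noNN (e :: a'')) from rfl] at hca
          exact (Bool.and_eq_true_iff.mp hca).2
        · intro hgl
          apply hbd
          rw [show ((c :: e :: a'') : List Char).getLast? = (e :: a'').getLast? by
            rw [show ((c :: e :: a'') : List Char) = [c] ++ (e :: a'') from rfl, List.getLast?_append]
            cases hg : (e :: a'').getLast? with
            | none => exact absurd (List.getLast?_eq_none_iff.mp hg) (by simp)
            | some x => simp]
          exact hgl

theorem pv_noNN_j1 (blk : List (List Char)) :
    blk ≠ [] → (∀ l ∈ blk, l ≠ [] ∧ '\n' ∉ l) →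
    noNN (PySem.Chars.join ['\n'] blk) = true := by
  induction blk with
  | nil => intro h; cases h rfl
  | cons a rest ih =>
    intro _ hl
    obtain ⟨hna, hnla⟩ := hl a (by simp)
    cases rest with
    | nil => rw [pv_j_single]; exact pv_noNN_of_no_nl a hnla
    | cons b rs =>
      rw [pv_j_cons ['\n'] a (b :: rs) (by simp), List.append_assoc]
      apply pv_noNN_append
      · exact pv_noNN_of_no_nl a hnla
      · have hb := hl b (by simp)
        obtain ⟨c, t, hct⟩ : ∃ c t, b = c :: t := by
          cases b with | nil => cases hb.1 rfl | cons c t => exact ⟨c, t, rfl⟩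
        obtain ⟨w, hw⟩ := pv_j1_head b rs c t hct
        rw [show (['\n'] ++ PySem.Chars.join ['\n'] (b :: rs) : List Char)
              = '\n' :: PySem.Chars.join ['\n'] (b :: rs) from rfl, hw]
        rw [show noNN ('\n' :: c :: w) = (!('\n' = '\n' && c = '\n') && noNN (c :: w)) from rfl]
        rw [Bool.and_eq_true_iff]
        constructor
        · have hc : c ≠ '\n' := by
            intro he; exact hb.2 (by rw [hct, he]; simp)
          simp [hc]
        · rw [← hw]
          exact ih (by simp) (fun l h => hl l (by simp [h]))
      · intro hgl
        exfalso
        exact hnla (pv_getLast?_mem a '\n' hgl)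

-- ---------- splitOn on "\n\n" recovers the paragraphs ----------

theorem pv_go_fuel : ∀ (f : Nat), ∀ (l cur : List Char) (acc : List (List Char)),
    l.length + 1 ≤ f →
    PySem.Chars.splitOn.go ['\n','\n'] f l cur acc
      = PySem.Chars.splitOn.go ['\n','\n'] (l.length + 1) l cur acc := by
  intro f
  induction f using Nat.strong_induction_on with
  | _ f ih =>
    intro l cur acc hf
    obtain ⟨f', rfl⟩ : ∃ f', f = f' + 1 := ⟨f - 1, by omega⟩
    cases l with
    | nil => simp [PySem.Chars.splitOn.go]
    | cons c rest =>
      by_cases hp : (['\n','\n'].isPrefixOf (c :: rest)) = true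
      · obtain ⟨r, hr⟩ : ∃ r, c :: rest = '\n' :: '\n' :: r := by
          obtain ⟨r, hr⟩ := List.isPrefixOf_iff_prefix.mp hp
          exact ⟨r, by rw [← hr]; rfl⟩
        rw [hr] at hf ⊢
        have hlen : (('\n'::'\n'::r : List Char)).length = r.length + 2 := by simp
        rw [hlen]
        have hfr : r.length + 1 ≤ f' := by simp only [List.length_cons] at hf; omega
        rw [show PySem.Chars.splitOn.go ['\n','\n'] (f' + 1) ('\n'::'\n'::r) cur acc
              = PySem.Chars.splitOn.go ['\n','\n'] f' r [] (cur.reverse :: acc) from by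
            simp [PySem.Chars.splitOn.go, List.isPrefixOf]]
        rw [show PySem.Chars.splitOn.go ['\n','\n'] (r.length + 2 + 1) ('\n'::'\n'::r) cur acc
              = PySem.Chars.splitOn.go ['\n','\n'] (r.length + 2) r [] (cur.reverse :: acc) from by
            simp [PySem.Chars.splitOn.go, List.isPrefixOf]]
        rw [ih f' (by omega) r [] (cur.reverse :: acc) hfr]
        rw [ih (r.length + 2) (by omega) r [] (cur.reverse :: acc) (by omega)]
      · have hp' : (['\n','\n'].isPrefixOf (c :: rest)) = false := Bool.eq_false_iff.mpr hp
        have hfr : rest.length + 1 ≤ f' := by simp only [List.length_cons] at hf; omega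
        rw [show ((c :: rest : List Char)).length + 1 = rest.length + 1 + 1 from by simp]
        rw [show PySem.Chars.splitOn.go ['\n','\n'] (f' + 1) (c :: rest) cur acc
              = PySem.Chars.splitOn.go ['\n','\n'] f' rest (c :: cur) acc from by
            simp [PySem.Chars.splitOn.go, hp']]
        rw [show PySem.Chars.splitOn.go ['\n','\n'] (rest.length + 1 + 1) (c :: rest) cur acc
              = PySem.Chars.splitOn.go ['\n','\n'] (rest.length + 1) rest (c :: cur) acc from by
            simp [PySem.Chars.splitOn.go, hp']]
        rw [ih f' (by omega) rest (c :: cur) acc hfr]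

theorem pv_go_last : ∀ (p cur : List Char) (acc : List (List Char)) (f : Nat),
    p.length + 1 ≤ f → noNN p = true →
    PySem.Chars.splitOn.go ['\n','\n'] f p cur acc = acc.reverse ++ [cur.reverse ++ p] := by
  intro p
  induction p with
  | nil =>
    intro cur acc f hf _
    obtain ⟨f', rfl⟩ : ∃ f', f = f' + 1 := ⟨f - 1, by omega⟩
    simp [PySem.Chars.splitOn.go]
  | cons c p' ih =>
    intro cur acc f hf hn
    obtain ⟨f', rfl⟩ : ∃ f', f = f' + 1 := ⟨f - 1, by omega⟩
    have hp : (['\n','\n'].isPrefixOf (c :: p')) = false := by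
      rw [Bool.eq_false_iff]
      intro hcontra
      obtain ⟨r, hr⟩ := List.isPrefixOf_iff_prefix.mp hcontra
      have h8 : c :: p' = '\n' :: '\n' :: r := by rw [← hr]; rfl
      rw [h8] at hn
      rw [show noNN ('\n' :: '\n' :: r) = (!('\n' = '\n' && '\n' = '\n') && noNN ('\n' :: r)) from rfl] at hn
      simp at hn
    rw [show PySem.Chars.splitOn.go ['\n','\n'] (f' + 1) (c :: p') cur acc
          = PySem.Chars.splitOn.go ['\n','\n'] f' p' (c :: cur) acc from by
        simp [PySem.Chars.splitOn.go, hp]]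
    rw [ih (c :: cur) acc f' (by simp only [List.length_cons] at hf; omega) (pv_noNN_tail _ _ hn)]
    simp

theorem pv_go_boundary : ∀ (p r cur : List Char) (acc : List (List Char)) (f : Nat),
    (p ++ '\n'::'\n'::r : List Char).length + 1 ≤ f → noNN p = true → p.getLast? ≠ some '\n' →
    PySem.Chars.splitOn.go ['\n','\n'] f (p ++ '\n'::'\n'::r) cur acc
      = PySem.Chars.splitOn.go ['\n','\n'] (r.length + 1) r [] ((cur.reverse ++ p) :: acc) := by
  intro p
  induction p with
  | nil =>
    intro r cur acc f hf _ _
    obtain ⟨f', rfl⟩ : ∃ f', f = f' + 1 := ⟨f - 1, by omega⟩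
    rw [List.nil_append]
    rw [show PySem.Chars.splitOn.go ['\n','\n'] (f' + 1) ('\n'::'\n'::r) cur acc
          = PySem.Chars.splitOn.go ['\n','\n'] f' r [] (cur.reverse :: acc) from by
        simp [PySem.Chars.splitOn.go, List.isPrefixOf]]
    rw [pv_go_fuel f' r [] _ (by simp only [List.length_cons, List.length_append] at hf; omega)]
    simp
  | cons c p' ih =>
    intro r cur acc f hf hn hlast
    obtain ⟨f', rfl⟩ : ∃ f', f = f' + 1 := ⟨f - 1, by omega⟩
    have hp : (['\n','\n'].isPrefixOf (c :: (p' ++ '\n'::'\n'::r))) = false := by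
      rw [Bool.eq_false_iff]
      intro hcontra
      obtain ⟨w, hw⟩ := List.isPrefixOf_iff_prefix.mp hcontra
      have hcw : c :: (p' ++ '\n'::'\n'::r) = '\n' :: '\n' :: w := by
        rw [show ('\n'::'\n'::w : List Char) = ['\n','\n'] ++ w from rfl]
        exact hw.symm
      cases p' with
      | nil =>
        have hc : c = '\n' := by
          have h9 := hcw
          simp only [List.nil_append, List.cons.injEq] at h9
          exact h9.1
        exact hlast (by rw [hc]; rfl)
      | cons d p'' =>
        have h9 := hcw
        simp only [List.cons_append, List.cons.injEq] at h9
        obtain ⟨hc, hd, -⟩ := h9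
        rw [hc, hd] at hn
        rw [show noNN ('\n' :: '\n' :: p'') = (!('\n' = '\n' && '\n' = '\n') && noNN ('\n' :: p'')) from rfl] at hn
        simp at hn
    rw [List.cons_append]
    rw [show PySem.Chars.splitOn.go ['\n','\n'] (f' + 1) (c :: (p' ++ '\n'::'\n'::r)) cur acc
          = PySem.Chars.splitOn.go ['\n','\n'] f' (p' ++ '\n'::'\n'::r) (c :: cur) acc from by
        simp [PySem.Chars.splitOn.go, hp]]
    have hlast' : p'.getLast? ≠ some '\n' := by
      cases p' with
      | nil => simp
      | cons d p'' =>
        intro hg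
        apply hlast
        rw [show ((c :: d :: p'' : List Char)).getLast? = (d :: p'').getLast? from by
          rw [show ((c :: d :: p'' : List Char)) = [c] ++ (d :: p'') from rfl, List.getLast?_append]
          cases hx : (d :: p'').getLast? with
          | none => exact absurd (List.getLast?_eq_none_iff.mp hx) (by simp)
          | some y => simp]
        exact hg
    rw [ih r (c :: cur) acc f'
        (by simp only [List.length_cons, List.length_append] at hf ⊢; omega)
        (pv_noNN_tail _ _ hn) hlast']
    simp

theorem pv_splitOn_j2 : ∀ (ps : List (List Char)) (acc : List (List Char)) (f : Nat),
    ps ≠ [] → (∀ p ∈ ps, noNN p = true ∧ p.getLast? ≠ some '\n') →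
    (PySem.Chars.join ['\n','\n'] ps).length + 1 ≤ f →
    PySem.Chars.splitOn.go ['\n','\n'] f (PySem.Chars.join ['\n','\n'] ps) [] acc
      = acc.reverse ++ ps := by
  intro ps
  induction ps with
  | nil => intro acc f h; cases h rfl
  | cons p ps' ih =>
    intro acc f _ hc hf
    cases ps' with
    | nil =>
      rw [pv_j_single] at hf ⊢
      rw [pv_go_last p [] acc f hf (hc p (by simp)).1]
      simp
    | cons q ps'' =>
      have hj : PySem.Chars.join ['\n','\n'] (p :: q :: ps'')
          = p ++ '\n'::'\n':: PySem.Chars.join ['\n','\n'] (q :: ps'') := by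
        rw [pv_j_cons ['\n','\n'] p (q :: ps'') (by simp)]
        simp
      rw [hj] at hf ⊢
      rw [pv_go_boundary p _ [] acc f hf (hc p (by simp)).1 (hc p (by simp)).2]
      rw [show (([] : List Char).reverse ++ p) = p from by simp]
      rw [ih (p :: acc) _ (by simp) (fun x hx => hc x (by simp [hx])) (le_refl _)]
      simp

theorem pv_splitOn_j2_top (ps : List (List Char)) (hne : ps ≠ [])
    (hc : ∀ p ∈ ps, noNN p = true ∧ p.getLast? ≠ some '\n') :
    PySem.Chars.splitOn (PySem.Chars.join ['\n','\n'] ps) ['\n','\n'] = ps := by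
  have h0 : PySem.Chars.splitOn (PySem.Chars.join ['\n','\n'] ps) ['\n','\n']
      = PySem.Chars.splitOn.go ['\n','\n'] ((PySem.Chars.join ['\n','\n'] ps).length + 1)
          (PySem.Chars.join ['\n','\n'] ps) [] [] := rfl
  rw [h0, pv_splitOn_j2 ps [] _ hne hc (le_refl _)]
  simp

-- ---------- colR / grpL structure facts ----------

theorem pv_colR_nil_iff : ∀ (xs : List (List Char)), colR true xs = [] ↔ ∀ l ∈ xs, l = [] := by
  intro xs
  induction xs with
  | nil => simp [colR]
  | cons l xs ih =>
    by_cases hl : l = []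
    · subst hl; simpa [colR] using ih
    · simp [colR, hl]

theorem pv_grpL_ne_nil : ∀ (xs cur : List (List Char)), cur ≠ [] → grpL cur xs ≠ [] := by
  intro xs
  induction xs with
  | nil => intro cur h; simp [grpL, h]
  | cons l xs ih =>
    intro cur h
    by_cases hl : l = []
    · simp [grpL, hl, h]
    · simp only [grpL, if_neg hl]
      exact ih (cur ++ [l]) (by simp)

theorem pv_grpL_nil_iff : ∀ (xs : List (List Char)), grpL [] xs = [] ↔ ∀ l ∈ xs, l = [] := by
  intro xs
  induction xs with
  | nil => simp [grpL]
  | cons l xs ih =>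
    by_cases hl : l = []
    · subst hl; simpa [grpL] using ih
    · simp only [grpL, if_neg hl]
      constructor
      · intro h; exact absurd h (pv_grpL_ne_nil xs [l] (by simp))
      · intro h; exact absurd (h l (by simp)) hl

theorem pv_colR_head : ∀ (xs : List (List Char)),
    colR true xs = [] ∨ ∃ l w, colR true xs = l :: w ∧ l ≠ [] ∧ l ∈ xs := by
  intro xs
  induction xs with
  | nil => left; rfl
  | cons l xs ih =>
    by_cases hl : l = []
    · subst hl
      rcases ih with h | ⟨r, w, h1, h2, h3⟩
      · left; simpa [colR] using h
      · right; exact ⟨r, w, by simpa [colR] using h1, h2, by simp [h3]⟩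
    · right; exact ⟨l, colR false xs, by simp [colR, hl], hl, by simp⟩

theorem pv_grpL_good : ∀ (xs cur : List (List Char)),
    (∀ l ∈ xs, GLn l) → (∀ l ∈ cur, GLn l ∧ l ≠ []) →
    ∀ blk ∈ grpL cur xs, blk ≠ [] ∧ ∀ l ∈ blk, GLn l ∧ l ≠ [] := by
  intro xs
  induction xs with
  | nil =>
    intro cur _ hcur blk hblk
    by_cases hc : cur = []
    · simp [grpL, hc] at hblk
    · simp [grpL, hc] at hblk
      subst hblk; exact ⟨hc, hcur⟩
  | cons l xs ih =>
    intro cur hxs hcur blk hblk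
    have hxs' := fun a ha => hxs a (List.mem_cons_of_mem _ ha)
    by_cases hl : l = []
    · subst hl
      by_cases hc : cur = []
      · rw [show grpL cur ([] :: xs) = grpL [] xs from by simp [grpL, hc]] at hblk
        exact ih [] hxs' (by simp) blk hblk
      · rw [show grpL cur ([] :: xs) = cur :: grpL [] xs from by simp [grpL, hc]] at hblk
        rcases List.mem_cons.mp hblk with h | h
        · subst h; exact ⟨hc, hcur⟩
        · exact ih [] hxs' (by simp) blk h
    · rw [show grpL cur (l :: xs) = grpL (cur ++ [l]) xs from by simp [grpL, hl]] at hblk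
      refine ih (cur ++ [l]) hxs' ?_ blk hblk
      intro a ha
      rcases List.mem_append.mp ha with h | h
      · exact hcur a h
      · rw [List.mem_singleton] at h
        rw [h]
        exact ⟨hxs l (by simp), hl⟩

-- ---------- the heart: A's collapse+join+strip equals the "\n\n"-join of B's paragraphs ----------

theorem pv_main : ∀ (xs : List (List Char)), (∀ l ∈ xs, GLn l) →
    (PySem.Chars.rstrip (PySem.Chars.join ['\n'] (colR true xs))
       = PySem.Chars.join ['\n','\n'] ((grpL [] xs).map (PySem.Chars.join ['\n'])))
    ∧ (∀ cur, cur ≠ [] → (∀ l ∈ cur, GLn l ∧ l ≠ []) →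
        PySem.Chars.rstrip (PySem.Chars.join ['\n'] (cur ++ colR false xs))
          = PySem.Chars.join ['\n','\n'] ((grpL cur xs).map (PySem.Chars.join ['\n']))) := by
  intro xs
  induction xs with
  | nil =>
    intro _
    constructor
    · rw [show colR true [] = [] from rfl, show grpL ([] : List (List Char)) [] = [] from by simp [grpL]]
      rw [pv_j_nil, List.map_nil, pv_j_nil]
      rfl
    · intro cur hcur hgood
      rw [show colR false [] = [] from rfl, List.append_nil]
      rw [show grpL cur [] = [cur] from by simp [grpL, hcur]]
      rw [List.map_cons, List.map_nil, pv_j_single]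
      exact (pv_j1_ends cur hcur (fun a ha => ⟨(hgood a ha).1.1, (hgood a ha).2⟩)).2
  | cons l xs ih =>
    intro hgl
    have hxs := fun a ha => hgl a (List.mem_cons_of_mem _ ha)
    obtain ⟨ihA, ihB⟩ := ih hxs
    by_cases hl : l = []
    · subst hl
      constructor
      · rw [show colR true ([] :: xs) = colR true xs from by simp [colR]]
        rw [show grpL ([] : List (List Char)) ([] :: xs) = grpL [] xs from by simp [grpL]]
        exact ihA
      · intro cur hcur hgood
        have hcurgood : ∀ a ∈ cur, PySem.Chars.strip a = a ∧ a ≠ [] :=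
          fun a ha => ⟨(hgood a ha).1.1, (hgood a ha).2⟩
        rw [show colR false ([] :: xs) = [] :: colR true xs from by simp [colR]]
        rw [show grpL cur ([] :: xs) = cur :: grpL [] xs from by simp [grpL, hcur]]
        rcases pv_colR_head xs with hR | ⟨r, w, hR, hrne, hrmem⟩
        · rw [hR]
          rw [pv_j_append ['\n'] cur [[]] hcur (by simp), pv_j_single, List.append_nil]
          rw [pv_rstrip_append, if_pos (by decide)]
          rw [(pv_j1_ends cur hcur hcurgood).2]
          rw [show grpL ([] : List (List Char)) xs = [] from
              (pv_grpL_nil_iff xs).mpr ((pv_colR_nil_iff xs).mp hR)]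
          rw [List.map_cons, List.map_nil, pv_j_single]
        · have hGne : grpL ([] : List (List Char)) xs ≠ [] := by
            rw [Ne, pv_grpL_nil_iff]
            intro h
            exact hrne (h r hrmem)
          obtain ⟨rc, rt, hrct⟩ : ∃ c t, r = c :: t := by
            cases r with | nil => cases hrne rfl | cons c t => exact ⟨c, t, rfl⟩
          have hrgood := hxs r hrmem
          have hrhead : PySem.Chars.isspace rc = false :=
            pv_stripped_head r (pv_strip_parts r hrgood.1).1 rc rt hrct
          obtain ⟨jw, hjw⟩ := pv_j1_head r w rc rt hrct
          have hrsne : PySem.Chars.rstrip (PySem.Chars.join ['\n'] (r :: w)) ≠ [] := by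
            rw [hjw]; exact pv_rstrip_ne_nil_of_head rc jw hrhead
          rw [hR]
          have e1 : PySem.Chars.join ['\n'] (cur ++ [] :: r :: w)
              = PySem.Chars.join ['\n'] cur ++ ('\n' :: '\n' :: PySem.Chars.join ['\n'] (r :: w)) := by
            rw [pv_j_append ['\n'] cur ([] :: r :: w) hcur (by simp)]
            rw [pv_j_cons ['\n'] [] (r :: w) (by simp)]
            simp
          rw [e1, pv_rstrip_append]
          have e2 : PySem.Chars.rstrip ('\n' :: '\n' :: PySem.Chars.join ['\n'] (r :: w))
              = '\n' :: '\n' :: PySem.Chars.rstrip (PySem.Chars.join ['\n'] (r :: w)) := by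
            have h3 := pv_rstrip_append ['\n','\n'] (PySem.Chars.join ['\n'] (r :: w))
            rw [if_neg hrsne] at h3
            simpa using h3
          rw [e2, if_neg (by simp)]
          rw [show PySem.Chars.join ['\n'] (r :: w) = PySem.Chars.join ['\n'] (colR true xs) from by
            rw [hR]]
          rw [ihA]
          rw [List.map_cons, pv_j_cons ['\n','\n'] (PySem.Chars.join ['\n'] cur)
              ((grpL [] xs).map (PySem.Chars.join ['\n'])) (by simpa using hGne)]
          simp
    · constructor
      · have hb := ihB [l] (by simp)
          (by intro a ha
              rw [List.mem_singleton] at ha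
              rw [ha]
              exact ⟨hgl l (by simp), hl⟩)
        rw [show colR true (l :: xs) = l :: colR false xs from by simp [colR, hl]]
        rw [show grpL ([] : List (List Char)) (l :: xs) = grpL [l] xs from by simp [grpL, hl]]
        simpa using hb
      · intro cur hcur hgood
        have hb := ihB (cur ++ [l]) (by simp)
          (by intro a ha
              rcases List.mem_append.mp ha with h | h
              · exact hgood a h
              · rw [List.mem_singleton] at h
                rw [h]
                exact ⟨hgl l (by simp), hl⟩)
        rw [show colR false (l :: xs) = l :: colR false xs from by simp [colR, hl]]
        rw [show grpL cur (l :: xs) = grpL (cur ++ [l]) xs from by simp [grpL, hl]]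
        simpa [List.append_assoc] using hb

theorem pv_strip_col (xs : List (List Char)) (hgl : ∀ l ∈ xs, GLn l) :
    PySem.Chars.strip (PySem.Chars.join ['\n'] (colR false xs))
      = PySem.Chars.join ['\n','\n'] ((grpL [] xs).map (PySem.Chars.join ['\n'])) := by
  have hdef : ∀ y, PySem.Chars.strip y = PySem.Chars.rstrip (PySem.Chars.lstrip y) := fun _ => rfl
  cases xs with
  | nil =>
    rw [show colR false [] = [] from rfl, show grpL ([] : List (List Char)) [] = [] from by simp [grpL]]
    rw [pv_j_nil, List.map_nil, pv_j_nil]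
    rfl
  | cons l xs =>
    have hxs := fun a ha => hgl a (List.mem_cons_of_mem _ ha)
    by_cases hl : l = []
    · subst hl
      rw [show colR false ([] :: xs) = [] :: colR true xs from by simp [colR]]
      rw [show grpL ([] : List (List Char)) ([] :: xs) = grpL [] xs from by simp [grpL]]
      rcases pv_colR_head xs with hR | ⟨r, w, hR, hrne, hrmem⟩
      · rw [hR, pv_j_single]
        rw [show grpL ([] : List (List Char)) xs = [] from
            (pv_grpL_nil_iff xs).mpr ((pv_colR_nil_iff xs).mp hR)]
        rw [List.map_nil, pv_j_nil]
        rfl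
      · rw [hR, pv_j_cons ['\n'] [] (r :: w) (by simp)]
        simp only [List.nil_append]
        rw [hdef]
        rw [show (['\n'] ++ PySem.Chars.join ['\n'] (r :: w) : List Char)
              = '\n' :: PySem.Chars.join ['\n'] (r :: w) from rfl]
        rw [pv_lstrip_cons_true _ (by decide)]
        obtain ⟨rc, rt, hrct⟩ : ∃ c t, r = c :: t := by
          cases r with | nil => cases hrne rfl | cons c t => exact ⟨c, t, rfl⟩
        have hrgood := hxs r hrmem
        have hrhead : PySem.Chars.isspace rc = false :=
          pv_stripped_head r (pv_strip_parts r hrgood.1).1 rc rt hrct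
        obtain ⟨jw, hjw⟩ := pv_j1_head r w rc rt hrct
        rw [hjw, pv_lstrip_cons_false _ hrhead, ← hjw]
        rw [show PySem.Chars.join ['\n'] (r :: w) = PySem.Chars.join ['\n'] (colR true xs) from by
          rw [hR]]
        exact (pv_main xs hxs).1
    · rw [show colR false (l :: xs) = l :: colR false xs from by simp [colR, hl]]
      rw [show grpL ([] : List (List Char)) (l :: xs) = grpL [l] xs from by simp [grpL, hl]]
      rw [hdef]
      obtain ⟨c, t, hct⟩ : ∃ c t, l = c :: t := by
        cases l with | nil => cases hl rfl | cons c t => exact ⟨c, t, rfl⟩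
      have hch : PySem.Chars.isspace c = false :=
        pv_stripped_head l (pv_strip_parts l (hgl l (by simp)).1).1 c t hct
      obtain ⟨w2, hw2⟩ := pv_j1_head l (colR false xs) c t hct
      rw [hw2, pv_lstrip_cons_false _ hch, ← hw2]
      have hb := (pv_main xs hxs).2 [l] (by simp)
        (by intro a ha
            rw [List.mem_singleton] at ha
            rw [ha]
            exact ⟨hgl l (by simp), hl⟩)
      simpa using hb

-- ---------- the filtered stripped lines are good ----------

theorem pv_ks_good (s : List Char) :
    ∀ l ∈ ((PySem.Chars.splitlines s).map PySem.Chars.strip).filter keepL, GLn l := by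
  intro l hl
  rw [List.mem_filter] at hl
  obtain ⟨hm, _⟩ := hl
  rw [List.mem_map] at hm
  obtain ⟨raw, hraw, rfl⟩ := hm
  refine ⟨pv_strip_strip raw, fun hnl => ?_⟩
  exact pv_splitlines_no_nl s raw hraw (pv_strip_subset raw '\n' hnl)

-- ===== VERDICT (by name: the statement is the Claim_ definition above) =====
theorem cleanup_message_text_spec : Claim_equal_cleanup_message_text := by
  intro message _
  show cleanup_message_text message = cleanup_message_text_alt message
  rw [show cleanup_message_text message =
    (if message.toList = [] then "" else
      if PySem.Chars.strip (PySem.Chars.join ['\n']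
          ((((PySem.Chars.splitlines message.toList).foldl (fun acc raw =>
              if PySem.Chars.strip raw = [] then acc ++ [PySem.Chars.strip raw]
              else if PySem.Chars.isIn pvPhrase (PySem.Chars.lower (PySem.Chars.strip raw)) then acc
              else acc ++ [PySem.Chars.strip raw]) []).foldl
            (fun (st : List (List Char) × Bool) line =>
              if line = [] then (if st.2 then st.1 else st.1 ++ [[]], true)
              else (st.1 ++ [line], false)) ([], false)).1)) = [] then ""
      else String.ofList (PySem.Chars.join ['\n', '\n']
        (if (((PySem.Chars.splitOn (PySem.Chars.strip (PySem.Chars.join ['\n']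
              ((((PySem.Chars.splitlines message.toList).foldl (fun acc raw =>
                  if PySem.Chars.strip raw = [] then acc ++ [PySem.Chars.strip raw]
                  else if PySem.Chars.isIn pvPhrase (PySem.Chars.lower (PySem.Chars.strip raw)) then acc
                  else acc ++ [PySem.Chars.strip raw]) []).foldl
                (fun (st : List (List Char) × Bool) line =>
                  if line = [] then (if st.2 then st.1 else st.1 ++ [[]], true)
                  else (st.1 ++ [line], false)) ([], false)).1)))
              ['\n', '\n']).map PySem.Chars.strip).filter (fun p => !p.isEmpty)).length > 3
         then (((PySem.Chars.splitOn (PySem.Chars.strip (PySem.Chars.join ['\n']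
              ((((PySem.Chars.splitlines message.toList).foldl (fun acc raw =>
                  if PySem.Chars.strip raw = [] then acc ++ [PySem.Chars.strip raw]
                  else if PySem.Chars.isIn pvPhrase (PySem.Chars.lower (PySem.Chars.strip raw)) then acc
                  else acc ++ [PySem.Chars.strip raw]) []).foldl
                (fun (st : List (List Char) × Bool) line =>
                  if line = [] then (if st.2 then st.1 else st.1 ++ [[]], true)
                  else (st.1 ++ [line], false)) ([], false)).1)))
              ['\n', '\n']).map PySem.Chars.strip).filter (fun p => !p.isEmpty)).take 3
         else (((PySem.Chars.splitOn (PySem.Chars.strip (PySem.Chars.join ['\n']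
              ((((PySem.Chars.splitlines message.toList).foldl (fun acc raw =>
                  if PySem.Chars.strip raw = [] then acc ++ [PySem.Chars.strip raw]
                  else if PySem.Chars.isIn pvPhrase (PySem.Chars.lower (PySem.Chars.strip raw)) then acc
                  else acc ++ [PySem.Chars.strip raw]) []).foldl
                (fun (st : List (List Char) × Bool) line =>
                  if line = [] then (if st.2 then st.1 else st.1 ++ [[]], true)
                  else (st.1 ++ [line], false)) ([], false)).1)))
              ['\n', '\n']).map PySem.Chars.strip).filter (fun p => !p.isEmpty))))) from rfl]
  rw [show cleanup_message_text_alt message =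
      String.ofList (PySem.Chars.join ['\n', '\n']
        ((finB ((PySem.Chars.splitlines message.toList).foldl (fun st raw =>
          if PySem.Chars.strip raw = [] then
            (if st.2 = [] then st.1 else st.1 ++ [PySem.Chars.join ['\n'] st.2], [])
          else if PySem.Chars.isIn pvPhrase (PySem.Chars.lower (PySem.Chars.strip raw)) then st
          else (st.1, st.2 ++ [PySem.Chars.strip raw])) ([], []))).take 3)) from rfl]
  rw [pv_foldB_eq, pv_filteredA_eq, List.nil_append, List.nil_append, pv_colA_eq, List.nil_append,
    pv_strip_col _ (pv_ks_good message.toList)]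
  set G := grpL [] (((PySem.Chars.splitlines message.toList).map PySem.Chars.strip).filter keepL)
    with hG
  set Ps := G.map (PySem.Chars.join ['\n']) with hPs
  have hPsGood : ∀ q ∈ Ps, q ≠ [] ∧ PySem.Chars.lstrip q = q ∧ PySem.Chars.rstrip q = q ∧
      noNN q = true ∧ q.getLast? ≠ some '\n' := by
    intro q hq
    rw [hPs, List.mem_map] at hq
    obtain ⟨blk, hblk, rfl⟩ := hq
    rw [hG] at hblk
    obtain ⟨hbne, hbl⟩ :=
      pv_grpL_good _ [] (pv_ks_good message.toList) (by simp) blk hblk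
    have hends := pv_j1_ends blk hbne (fun a ha => ⟨(hbl a ha).1.1, (hbl a ha).2⟩)
    refine ⟨pv_j1_ne_nil blk hbne (fun a ha => (hbl a ha).2), hends.1, hends.2, ?_,
      pv_rstrip_getLast _ hends.2⟩
    exact pv_noNN_j1 blk hbne (fun a ha => ⟨(hbl a ha).2, (hbl a ha).1.2⟩)
  by_cases hmsg : message.toList = []
  · rw [if_pos hmsg]
    have hPsnil : Ps = [] := by rw [hPs, hG, hmsg]; rfl
    rw [hPsnil, show (List.take 3 ([] : List (List Char))) = [] from rfl, pv_j_nil]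
  · rw [if_neg hmsg]
    by_cases hPs0 : Ps = []
    · rw [hPs0, pv_j_nil, if_pos rfl,
        show (List.take 3 ([] : List (List Char))) = [] from rfl]
      rfl
    · obtain ⟨p, Ps', hps⟩ := List.exists_cons_of_ne_nil hPs0
      rw [hps]
      have hPsne : PySem.Chars.join ['\n', '\n'] (p :: Ps') ≠ [] := by
        have hp := hPsGood p (by rw [hps]; simp)
        obtain ⟨c, t, hct⟩ : ∃ c t, p = c :: t := by
          cases p with | nil => cases hp.1 rfl | cons c t => exact ⟨c, t, rfl⟩
        cases Ps' with
        | nil => rw [pv_j_single, hct]; simp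
        | cons q ps2 => rw [pv_j_cons ['\n','\n'] p (q :: ps2) (by simp), hct]; simp
      rw [if_neg hPsne]
      rw [pv_splitOn_j2_top (p :: Ps') (by simp)
        (fun q hq => ⟨(hPsGood q (by rw [hps]; exact hq)).2.2.2.1,
          (hPsGood q (by rw [hps]; exact hq)).2.2.2.2⟩)]
      have hmap : List.map PySem.Chars.strip (p :: Ps') = p :: Ps' := by
        have h1 : ∀ q ∈ p :: Ps', PySem.Chars.strip q = q := by
          intro q hq
          have h := hPsGood q (by rw [hps]; exact hq)
          show PySem.Chars.rstrip (PySem.Chars.lstrip q) = q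
          rw [h.2.1, h.2.2.1]
        exact (List.map_congr_left h1).trans (List.map_id _)
      rw [hmap]
      rw [List.filter_eq_self.mpr (fun q hq => by
        simpa [List.isEmpty_iff] using (hPsGood q (by rw [hps]; exact hq)).1)]
      by_cases hlen : (p :: Ps').length > 3
      · rw [if_pos hlen]
      · rw [if_neg hlen, List.take_of_length_le (by omega)]
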